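-- pv_equiv track=rewrite | github.com/AlejandrooMoreno/ia-uncuyo-2025 | tp5-csp/code/n-reinas-csp.py | imprimir_solucion
-- ===== SOURCE A (Python) =====
-- from typing import Dict, List, Optional, Set, Tuple
--
-- Solution = Tuple[int, ...]
--
-- def imprimir_solucion(solucion: Solution) -> str:
--     """Entrega una representación visual básica del tablero."""
--     n = len(solucion)
--     filas = []
--     for fila in range(n):
--         fila_actual = []
--         for col in range(n):
--             fila_actual.append("Q" if solucion[col] == fila else ".")
--         filas.append(" ".join(fila_actual))
--     return "\n".join(filas)
-- ===== SOURCE B (Python) =====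
-- def imprimir_solucion(solucion):
--     """Entrega una representación visual básica del tablero."""
--     n = len(solucion)
--     grid = [["."] * n for _ in range(n)]
--     for col, row in enumerate(solucion):
--         if 0 <= row < n:
--             grid[row][col] = "Q"
--     return "\n".join(" ".join(fila) for fila in grid)
-- ===== Notes on version B (the rewrite author's own statement) =====
-- stated objective: alternative
-- what changed: Instead of testing every (row,col) cell against every queen (nested O(n^2) equality scans), B allocates an n-by-n grid of '.' and scatters a 'Q' into it with one pass over enumerate(solucion), then joins the rows.
import Mathlib
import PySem

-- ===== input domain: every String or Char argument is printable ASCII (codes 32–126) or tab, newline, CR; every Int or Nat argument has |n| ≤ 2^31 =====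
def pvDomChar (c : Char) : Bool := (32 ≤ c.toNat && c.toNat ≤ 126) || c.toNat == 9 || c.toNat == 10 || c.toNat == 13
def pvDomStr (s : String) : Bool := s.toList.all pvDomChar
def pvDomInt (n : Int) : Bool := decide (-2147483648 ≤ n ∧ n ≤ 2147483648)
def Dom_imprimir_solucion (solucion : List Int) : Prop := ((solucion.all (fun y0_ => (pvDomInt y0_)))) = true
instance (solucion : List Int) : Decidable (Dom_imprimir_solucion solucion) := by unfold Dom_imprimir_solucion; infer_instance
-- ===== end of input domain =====

-- B renders the board by scattering: allocate an n×n grid of "." and place each queen in one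
-- pass over enumerate(solucion), instead of A's per-cell nested equality scans (objective: alternative).

-- ===== PORT A =====
def imprimir_solucion (solucion : List Int) : String :=
  let n : Int := (solucion.length : Int)
  let filas := (PySem.List.pyRange 0 n 1).foldl (fun filas fila =>
    let fila_actual := (PySem.List.pyRange 0 n 1).foldl (fun fila_actual col =>
      fila_actual ++ [if PySem.List.pyGetD solucion col 0 = fila then "Q" else "."])
      ([] : List String)
    filas ++ [PySem.Str.join " " fila_actual]) ([] : List String)
  PySem.Str.join "\n" filas

-- ===== PORT B =====
-- one placement step: grid[row][col] = "Q" when 0 <= row < n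
def pvPlace (n : Nat) (g : List (List String)) (p : Int × Int) : List (List String) :=
  if 0 ≤ p.2 ∧ p.2 < (n : Int) then g.modify p.2.toNat (fun fila => fila.set p.1.toNat "Q") else g

def imprimir_solucion_alt (solucion : List Int) : String :=
  let n := solucion.length
  let grid0 : List (List String) := List.replicate n (List.replicate n ".")
  let grid := (PySem.List.enumerate solucion 0).foldl (pvPlace n) grid0
  PySem.Str.join "\n" (grid.map (fun fila => PySem.Str.join " " fila))

-- ===== PRECONDITION & SPEC =====
def Spec_imprimir_solucion (solucion : List Int) (out : String) : Prop := out = imprimir_solucion_alt solucion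
instance (solucion : List Int) (out : String) : Decidable (Spec_imprimir_solucion solucion out) := by unfold Spec_imprimir_solucion; infer_instance

-- ===== CLAIM (what is proved, stated in full; the proofs are below) =====
def Claim_equal_imprimir_solucion : Prop := ∀ (solucion : List Int), Dom_imprimir_solucion solucion → Spec_imprimir_solucion solucion (imprimir_solucion solucion)

-- ===== LEMMAS AND PROOFS =====

theorem length_pvPlace (n : Nat) (g : List (List String)) (p : Int × Int) :
    (pvPlace n g p).length = g.length := by
  unfold pvPlace; split <;> simp

theorem rows_pvPlace (n : Nat) (g : List (List String)) (p : Int × Int)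
    (hrow : ∀ r ∈ g, r.length = n) : ∀ r ∈ pvPlace n g p, r.length = n := by
  unfold pvPlace
  split
  · intro r hr
    rcases List.mem_iff_getElem?.1 hr with ⟨j, hj⟩
    rw [List.getElem?_modify] at hj
    cases hgj : g[j]? with
    | none => simp [hgj] at hj
    | some a =>
      have ha : a ∈ g := List.mem_iff_getElem?.2 ⟨j, hgj⟩
      simp only [hgj, Option.map_eq_map, Option.map_some, Option.some.injEq] at hj
      split at hj <;> subst hj
      · simp [hrow a ha]
      · exact hrow a ha
  · exact hrow

theorem length_fold_place (n : Nat) (t : List Int) : ∀ (i : Int) (g : List (List String)),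
    ((PySem.List.enumerate t i).foldl (pvPlace n) g).length = g.length := by
  induction t with
  | nil => intro i g; simp [PySem.List.enumerate_nil]
  | cons x xs ih =>
    intro i g
    rw [PySem.List.enumerate_cons, List.foldl_cons, ih]
    exact length_pvPlace n g (i, x)

theorem rows_fold_place (n : Nat) (t : List Int) : ∀ (i : Int) (g : List (List String)),
    (∀ r ∈ g, r.length = n) → ∀ r ∈ (PySem.List.enumerate t i).foldl (pvPlace n) g, r.length = n := by
  induction t with
  | nil => intro i g hg; simpa [PySem.List.enumerate_nil] using hg
  | cons x xs ih =>
    intro i g hg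
    rw [PySem.List.enumerate_cons, List.foldl_cons]
    exact ih (i + 1) _ (rows_pvPlace n g (i, x) hg)

-- cell (f, c) of the grid after the placement pass over enumerate t i
theorem place_fold (n : Nat) (t : List Int) : ∀ (i : Nat) (g : List (List String)) (f c : Nat),
    g.length = n → (∀ r ∈ g, r.length = n) → f < n → c < n →
    (((PySem.List.enumerate t (i : Int)).foldl (pvPlace n) g)[f]?.bind (fun r => r[c]?)) =
      if i ≤ c ∧ c < i + t.length ∧ t[c - i]? = some (f : Int) then some "Q"
      else g[f]?.bind (fun r => r[c]?) := by
  induction t with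
  | nil =>
    intro i g f c hg hrow hf hc
    rw [PySem.List.enumerate_nil, List.foldl_nil,
      if_neg (by rintro ⟨h1, h2, _⟩; simp only [List.length_nil] at h2; omega)]
  | cons x xs ih =>
    intro i g f c hg hrow hf hc
    rw [PySem.List.enumerate_cons, List.foldl_cons]
    have hcast : (i : Int) + 1 = ((i + 1 : Nat) : Int) := by push_cast; ring
    rw [hcast, ih (i + 1) (pvPlace n g ((i : Int), x)) f c
        (by rw [length_pvPlace]; exact hg) (rows_pvPlace n g _ hrow) hf hc]
    by_cases hci : c = i
    · subst hci
      by_cases hxf : x = (f : Int)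
      · -- the queen of column c lands exactly on row f
        rw [if_neg (by rintro ⟨h1, _, _⟩; omega),
          if_pos ⟨le_refl c, by simp only [List.length_cons]; omega, by simp [hxf]⟩]
        subst hxf
        unfold pvPlace
        rw [if_pos ⟨by show (0:Int) ≤ (f:Int); positivity, by show (f:Int) < (n:Int); exact_mod_cast hf⟩]
        simp only [Int.toNat_natCast]
        rw [List.getElem?_modify]
        have hfg : g[f]? = some g[f] := List.getElem?_eq_getElem (by omega)
        have hlen : g[f].length = n := hrow _ (List.getElem_mem (by omega))
        simp [hfg, hlen, hc]
      · -- column c carries a different row value: cell (f,c) untouched, both conditions false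
        rw [if_neg (by rintro ⟨h1, _, _⟩; omega), if_neg (by rintro ⟨_, _, h3⟩; simp at h3; exact hxf h3)]
        unfold pvPlace
        split
        · simp only [Int.toNat_natCast]
          rw [List.getElem?_modify]
          rename_i hcond
          cases hgf : g[f]? with
          | none => simp
          | some a =>
            simp only [Option.map_eq_map, Option.map_some, Option.bind_some]
            split
            · rename_i hxeq
              exfalso; apply hxf
              have h0 : (0:Int) ≤ x := hcond.1
              omega
            · rfl
        · rfl
    · -- c ≠ i: this step writes column i only; conditions line up
      have hcell : (pvPlace n g ((i : Int), x))[f]?.bind (fun r => r[c]?) =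
          g[f]?.bind (fun r => r[c]?) := by
        unfold pvPlace
        split
        · simp only [Int.toNat_natCast]
          rw [List.getElem?_modify]
          cases hgf : g[f]? with
          | none => simp
          | some a =>
            simp only [Option.map_eq_map, Option.map_some, Option.bind_some]
            split
            · rw [List.getElem?_set, if_neg (by omega)]
            · rfl
        · rfl
      rw [hcell]
      by_cases hlt : i < c
      · have h1 : c - i = (c - (i + 1)) + 1 := by omega
        rw [h1]
        simp only [List.getElem?_cons_succ]
        have hiff : (i + 1 ≤ c ∧ c < i + 1 + xs.length ∧ xs[c - (i + 1)]? = some (f : Int)) ↔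
            (i ≤ c ∧ c < i + (x :: xs).length ∧ xs[c - (i + 1)]? = some (f : Int)) := by
          constructor <;> rintro ⟨h1, h2, h3⟩ <;>
            exact ⟨by omega, by simp only [List.length_cons] at *; omega, h3⟩
        rw [if_congr hiff rfl rfl]
        rfl
      · rw [if_neg (by rintro ⟨h1, _, _⟩; omega), if_neg (by rintro ⟨h1, _, _⟩; omega)]

-- the final grid is exactly the board A describes cell by cell
theorem grid_eq (sol : List Int) :
    (PySem.List.enumerate sol 0).foldl (pvPlace sol.length)
        (List.replicate sol.length (List.replicate sol.length ".")) =
      (List.range sol.length).map (fun (f : Nat) =>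
        (List.range sol.length).map (fun (c : Nat) => if sol[c]? = some ((f : Int)) then "Q" else ".")) := by
  set n := sol.length with hn
  apply List.ext_getElem?
  intro f
  have hlen : ((PySem.List.enumerate sol (0 : Int)).foldl (pvPlace n)
      (List.replicate n (List.replicate n "."))).length = n := by
    rw [length_fold_place]; simp
  by_cases hf : f < n
  · have hl : f < ((PySem.List.enumerate sol (0 : Int)).foldl (pvPlace n)
        (List.replicate n (List.replicate n "."))).length := by omega
    rw [List.getElem?_eq_getElem hl, List.getElem?_map, List.getElem?_range hf]
    simp only [Option.map_some, Option.some.injEq]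
    set r := ((PySem.List.enumerate sol (0 : Int)).foldl (pvPlace n)
        (List.replicate n (List.replicate n ".")))[f] with hr
    have hrmem : r ∈ (PySem.List.enumerate sol (0 : Int)).foldl (pvPlace n)
        (List.replicate n (List.replicate n ".")) := List.getElem_mem hl
    have hrlen : r.length = n := by
      refine rows_fold_place n sol 0 _ ?_ r hrmem
      intro row hrow; exact (List.eq_of_mem_replicate hrow) ▸ (by simp)
    apply List.ext_getElem?
    intro c
    by_cases hc : c < n
    · have hmain := place_fold n sol 0 (List.replicate n (List.replicate n ".")) f c
        (by simp) (by intro row hrow; exact (List.eq_of_mem_replicate hrow) ▸ (by simp)) hf hc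
      have hcast : ((0 : Nat) : Int) = (0 : Int) := rfl
      rw [hcast] at hmain
      rw [List.getElem?_eq_getElem hl, Option.bind_some] at hmain
      rw [← hr] at hmain
      rw [hmain, List.getElem?_map, List.getElem?_range hc]
      have hrep : (List.replicate n (List.replicate n "."))[f]?.bind (fun r => r[c]?) =
          some "." := by
        rw [List.getElem?_replicate, if_pos hf]
        simp [hc]
      rw [hrep]
      simp only [Nat.zero_le, Nat.sub_zero, Nat.zero_add, true_and, Option.map_some]
      by_cases hcond : sol[c]? = some (f : Int)
      · rw [if_pos ⟨by omega, hcond⟩, if_pos hcond]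
      · rw [if_neg (by rintro ⟨_, h⟩; exact hcond h), if_neg hcond]
    · rw [List.getElem?_eq_none (by omega), List.getElem?_eq_none (by simp; omega)]
  · rw [List.getElem?_eq_none (by omega), List.getElem?_eq_none (by simp; omega)]

theorem imprimir_eq (sol : List Int) : imprimir_solucion sol = imprimir_solucion_alt sol := by
  unfold imprimir_solucion imprimir_solucion_alt
  simp only [PySem.List.foldl_append_singleton_eq_map, List.nil_append]
  rw [grid_eq, PySem.List.pyRange_zero_nat, List.map_map, List.map_map]
  congr 1
  apply List.map_congr_left
  intro f _
  simp only [Function.comp]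
  congr 1
  rw [List.map_map]
  apply List.map_congr_left
  intro c hc
  simp only [Function.comp]
  have hc' : c < sol.length := List.mem_range.1 hc
  rw [PySem.List.pyGetD_natCast, List.getD_eq_getElem _ _ hc', List.getElem?_eq_getElem hc']
  by_cases h : sol[c] = (f : Int)
  · rw [if_pos h, if_pos (by simp [h])]
  · rw [if_neg h, if_neg (by simp [h])]

-- ===== VERDICT (by name: the statement is the Claim_ definition above) =====
theorem imprimir_solucion_spec : Claim_equal_imprimir_solucion := by
  intro sol _
  unfold Spec_imprimir_solucion
  exact imprimir_eq sol
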